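-- pv_equiv track=rewrite | github.com/BorisBondarenko/CheckiO | All Upper I/08_All Upper I.py | is_all_upper
-- ===== SOURCE A (Python) =====
-- def is_all_upper(text: str) -> bool:
--     result = text.isupper()
--     if len(text) == 0:
--         result = True
--     for i in text:
--         if i.isdigit() or i.isspace():
--             result = True
--         if i.islower():
--             result = False
--     return result
-- ===== SOURCE B (Python) =====
-- def is_all_upper(text: str) -> bool:
--     # A's result is decided by the LAST char that is lowercase (-> False) or
--     # digit/space (-> True); scan from the end with early return instead.
--     for ch in reversed(text):
--         if ch.islower():
--             return False
--         if ch.isdigit() or ch.isspace():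
--             return True
--     return True if len(text) == 0 else text.isupper()
-- ===== Notes on version B (the rewrite author's own statement) =====
-- stated objective: faster
-- what changed: B replaces A's unconditional fold over every character with a reversed-order scan that returns at the first (i.e. last-in-text) lowercase or digit/space character, falling back to isupper()/True only when none exists.
import Mathlib
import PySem

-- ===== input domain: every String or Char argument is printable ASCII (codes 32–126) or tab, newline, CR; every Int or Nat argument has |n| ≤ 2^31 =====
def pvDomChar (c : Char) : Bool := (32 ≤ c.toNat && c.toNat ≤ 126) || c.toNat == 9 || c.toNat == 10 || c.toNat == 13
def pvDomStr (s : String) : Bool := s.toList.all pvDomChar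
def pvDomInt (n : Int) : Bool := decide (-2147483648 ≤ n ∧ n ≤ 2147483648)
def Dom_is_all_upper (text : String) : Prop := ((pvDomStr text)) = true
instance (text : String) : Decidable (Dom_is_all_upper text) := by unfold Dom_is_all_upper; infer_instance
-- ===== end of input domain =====

-- B scans the characters from the end with early exit (the last lowercase or digit/space
-- char decides the result) instead of A's full fold over the whole string; alternative
-- decomposition, same return value.

-- str.isupper(): at least one cased char and no lowercase char; hand-written, exact on
-- the ASCII domain (where the cased chars are exactly the lower/upper letters).
def pyStrIsupper (l : List Char) : Bool :=
  l.any (fun c => PySem.Chars.islower c || PySem.Chars.isupper c) &&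
  l.all (fun c => !PySem.Chars.islower c)

-- ===== PORT A =====
-- the loop body of A: digit/space sets result to True, then islower sets it to False
def aStep (r : Bool) (c : Char) : Bool :=
  let r1 := if PySem.Chars.isdigit c || PySem.Chars.isspace c then true else r
  if PySem.Chars.islower c then false else r1

def is_all_upper (text : String) : Bool :=
  let result := pyStrIsupper text.toList
  let result := if PySem.Str.len text = 0 then true else result
  text.toList.foldl aStep result

-- ===== PORT B =====
-- early-return scan over reversed(text); `fallback` is what B returns after the loop
def altGo (fallback : Bool) : List Char → Bool
  | [] => fallback
  | c :: rest =>
    if PySem.Chars.islower c then false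
    else if PySem.Chars.isdigit c || PySem.Chars.isspace c then true
    else altGo fallback rest

def is_all_upper_alt (text : String) : Bool :=
  altGo (if PySem.Str.len text = 0 then true else pyStrIsupper text.toList)
    text.toList.reverse

-- ===== PRECONDITION & SPEC =====
def Spec_is_all_upper (text : String) (out : Bool) : Prop := out = is_all_upper_alt text
instance (text : String) (out : Bool) : Decidable (Spec_is_all_upper text out) := by unfold Spec_is_all_upper; infer_instance

-- ===== CLAIM (what is proved, stated in full; the proofs are below) =====
def Claim_equal_is_all_upper : Prop := ∀ (text : String), Dom_is_all_upper text → Spec_is_all_upper text (is_all_upper text)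

-- ===== LEMMAS AND PROOFS =====
theorem altGo_append (fb : Bool) (xs : List Char) (c : Char) :
    altGo fb (xs ++ [c]) = altGo (aStep fb c) xs := by
  induction xs with
  | nil => cases h1 : PySem.Chars.islower c <;>
      cases h2 : PySem.Chars.isdigit c || PySem.Chars.isspace c <;>
        simp [altGo, aStep, h1, h2]
  | cons x xs ih => simp [altGo, ih]

theorem foldl_eq_altGo_reverse (l : List Char) (r : Bool) :
    l.foldl aStep r = altGo r l.reverse := by
  induction l generalizing r with
  | nil => simp [altGo]
  | cons c l ih => simp [List.foldl_cons, ih (aStep r c), List.reverse_cons, altGo_append]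

-- ===== VERDICT (by name: the statement is the Claim_ definition above) =====
theorem is_all_upper_spec : Claim_equal_is_all_upper := by
  intro text _
  unfold Spec_is_all_upper is_all_upper is_all_upper_alt
  exact foldl_eq_altGo_reverse _ _
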